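-- pv_equiv track=rewrite | github.com/cacaview/py-claw | src/py_claw/tools/bash_security.py | _extract_command
-- ===== SOURCE A (Python) =====
-- def _extract_command(command: str) -> str:
--     """Extract the base command from a shell command string."""
--     stripped = command.strip()
--     for sep in (" | ", " || ", " && ", " > ", " >> ", " < ", " 2>", " &"):
--         if sep in stripped:
--             stripped = stripped.split(sep)[0]
--     stripped = stripped.strip()
--     tokens = stripped.split()
--     if not tokens:
--         return ""
--     return tokens[0].split("/")[-1]
-- ===== SOURCE B (Python) =====
-- def _extract_command(command: str) -> str:
--     """Extract the base command from a shell command string."""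
--     tokens = command.split()
--     if not tokens:
--         return ""
--     return tokens[0].split("/")[-1]
-- ===== Notes on version B (the rewrite author's own statement) =====
-- stated objective: simpler
-- what changed: B deletes the eight-separator sequential cutting loop and both strip calls entirely: every separator begins with a space, so any cut lands at or after the end of the first whitespace-delimited token and cannot change it; B simply whitespace-splits the command and returns the basename (text after the last slash) of the first token.
import Mathlib
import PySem

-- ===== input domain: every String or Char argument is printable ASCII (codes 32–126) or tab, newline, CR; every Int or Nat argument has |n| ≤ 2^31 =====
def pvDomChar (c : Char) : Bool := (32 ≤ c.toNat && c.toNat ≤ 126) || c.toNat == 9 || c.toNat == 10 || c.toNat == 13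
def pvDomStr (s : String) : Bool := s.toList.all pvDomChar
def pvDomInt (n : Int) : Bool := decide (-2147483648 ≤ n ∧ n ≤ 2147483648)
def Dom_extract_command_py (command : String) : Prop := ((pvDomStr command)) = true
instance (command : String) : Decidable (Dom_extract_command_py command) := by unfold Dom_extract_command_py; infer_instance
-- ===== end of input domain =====

-- B drops A's eight-separator cutting loop and both strip() calls (provably without effect on the
-- returned value, since every separator starts with a space) and returns the basename of the first
-- whitespace-delimited token directly: a simpler single-pass computation.

-- ===== PORT A =====
def pvSeps : List String := [" | ", " || ", " && ", " > ", " >> ", " < ", " 2>", " &"]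

-- one iteration of A's loop body: 'if sep in stripped: stripped = stripped.split(sep)[0]'
def pvCutOnce (st sep : String) : String :=
  if PySem.Str.isIn sep st then
    -- sep is a nonempty literal, so st.split(sep) cannot raise; split? is always some
    PySem.List.pyGetD ((PySem.Str.split? st sep).getD []) 0 ""
  else st

def extract_command_py (command : String) : String :=
  let stripped := PySem.Str.strip command
  let stripped := pvSeps.foldl pvCutOnce stripped
  let stripped := PySem.Str.strip stripped
  let tokens := PySem.Str.split₀ stripped
  match tokens with
  | [] => ""
  | t :: _ => PySem.List.pyGetD ((PySem.Str.split? t "/").getD []) (-1) ""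

def extract_command_py_alt (command : String) : String :=
  match PySem.Str.split₀ command with
  | [] => ""
  | t :: _ => PySem.List.pyGetD ((PySem.Str.split? t "/").getD []) (-1) ""


-- ===== PRECONDITION & SPEC =====
def Spec_extract_command_py (command : String) (out : String) : Prop := out = extract_command_py_alt command
instance (command : String) (out : String) : Decidable (Spec_extract_command_py command out) := by unfold Spec_extract_command_py; infer_instance

-- ===== CLAIM (what is proved, stated in full; the proofs are below) =====
def Claim_equal_extract_command_py : Prop := ∀ (command : String), Dom_extract_command_py command → Spec_extract_command_py command (extract_command_py command)

-- ===== LEMMAS AND PROOFS =====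
def pvCutAt (sep : List Char) : List Char → List Char
  | [] => []
  | c :: rest => if sep.isPrefixOf (c :: rest) then [] else c :: pvCutAt sep rest

-- splitOn.go with a nonempty accumulator: the first piece is already decided
theorem pvGoAcc (sep : List Char) (fuel : Nat) : ∀ (l cur : List Char) (as : List (List Char)) (a : List Char),
    (PySem.Chars.splitOn.go sep fuel l cur (as ++ [a])).head? = some a := by
  induction fuel with
  | zero =>
    intro l cur as a
    rw [PySem.Chars.splitOn.go.eq_def]
    simp
  | succ f ih =>
    intro l cur as a
    rw [PySem.Chars.splitOn.go.eq_def]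
    cases l with
    | nil => simp
    | cons c rest =>
      by_cases hp : sep.isPrefixOf (c :: rest) = true
      · simp only [hp, if_true]
        have : PySem.Chars.splitOn.go sep f (List.drop sep.length (c :: rest)) [] (cur.reverse :: (as ++ [a]))
            = PySem.Chars.splitOn.go sep f (List.drop sep.length (c :: rest)) [] ((cur.reverse :: as) ++ [a]) := by
          simp
        rw [this, ih]
      · simp only [hp]
        exact ih rest (c :: cur) as a

-- splitOn.go with empty accumulator: the first piece is cur.reverse ++ the text before the first match
theorem pvGoHead (sep : List Char) : ∀ (l : List Char) (fuel : Nat) (cur : List Char),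
    l.length < fuel →
    (PySem.Chars.splitOn.go sep fuel l cur []).head? = some (cur.reverse ++ pvCutAt sep l) := by
  intro l
  induction l with
  | nil =>
    intro fuel cur h
    cases fuel with
    | zero => omega
    | succ f => rw [PySem.Chars.splitOn.go.eq_def]; simp [pvCutAt]
  | cons c rest ih =>
    intro fuel cur h
    cases fuel with
    | zero => simp at h
    | succ f =>
      rw [PySem.Chars.splitOn.go.eq_def]
      by_cases hp : sep.isPrefixOf (c :: rest) = true
      · simp only [hp, if_true]
        have := pvGoAcc sep f (List.drop sep.length (c :: rest)) [] [] cur.reverse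
        simp only [List.nil_append] at this
        rw [this]
        simp [pvCutAt, hp]
      · simp only [hp, if_false, Bool.false_eq_true]
        rw [ih f (c :: cur) (by simpa using Nat.lt_of_succ_lt_succ h)]
        simp [pvCutAt, hp]

theorem pvSplitOnHead (l sep : List Char) :
    (PySem.Chars.splitOn l sep).head? = some (pvCutAt sep l) := by
  unfold PySem.Chars.splitOn
  rw [pvGoHead sep l (l.length + 1) [] (by omega)]
  simp

-- every separator begins with ' ', so a cut never eats into the first token
theorem pvCutAt_takeWhile (tl : List Char) : ∀ (l : List Char),
    (pvCutAt (' ' :: tl) l).takeWhile (fun c => !PySem.Chars.isspace c)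
      = l.takeWhile (fun c => !PySem.Chars.isspace c) := by
  intro l
  induction l with
  | nil => simp [pvCutAt]
  | cons c rest ih =>
    by_cases hp : (' ' :: tl).isPrefixOf (c :: rest) = true
    · have hc : c = ' ' := by
        obtain ⟨t, ht⟩ := List.isPrefixOf_iff_prefix.mp hp
        have := congrArg List.head? ht
        simpa [eq_comm] using this
      have e : pvCutAt (' ' :: tl) (c :: rest) = [] := by
        simp only [pvCutAt]; rw [if_pos hp]
      rw [e, hc]
      have hsp : PySem.Chars.isspace ' ' = true := by decide
      simp [hsp]
    · have e : pvCutAt (' ' :: tl) (c :: rest) = c :: pvCutAt (' ' :: tl) rest := by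
        simp only [pvCutAt]; rw [if_neg hp]
      rw [e, List.takeWhile_cons, List.takeWhile_cons]
      by_cases hs : PySem.Chars.isspace c
      · simp [hs]
      · simp [hs, ih]

theorem pvCutAt_head (tl : List Char) (c : Char) (rest : List Char)
    (h : PySem.Chars.isspace c = false) :
    pvCutAt (' ' :: tl) (c :: rest) = c :: pvCutAt (' ' :: tl) rest := by
  have hne : (' ' == c) = false := by
    cases e : (' ' == c) with
    | false => rfl
    | true =>
      exfalso
      have hc : ' ' = c := by exact eq_of_beq e
      rw [← hc] at h
      have : PySem.Chars.isspace ' ' = true := by decide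
      rw [this] at h; cases h
  have hp : ¬ ((' ' :: tl).isPrefixOf (c :: rest) = true) := by
    simp [List.isPrefixOf_cons₂, hne]
  simp only [pvCutAt]; rw [if_neg hp]

-- split₀.go with a nonempty accumulator: the first word is already decided
theorem pvSGoAcc : ∀ (s cur : List Char) (as : List (List Char)) (a : List Char),
    (PySem.Chars.split₀.go s cur (as ++ [a])).head? = some a := by
  intro s
  induction s with
  | nil =>
    intro cur as a
    rw [PySem.Chars.split₀.go.eq_def]
    by_cases hc : cur.isEmpty = true <;> simp [hc]
  | cons c rest ih =>
    intro cur as a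
    rw [PySem.Chars.split₀.go.eq_def]
    by_cases hs : PySem.Chars.isspace c = true
    · simp only [hs, if_true]
      by_cases hc : cur.isEmpty = true
      · simp only [hc, if_true]; exact ih [] as a
      · simp only [hc, if_false, Bool.false_eq_true]
        have : (cur.reverse :: (as ++ [a])) = ((cur.reverse :: as) ++ [a]) := by simp
        rw [this]; exact ih [] (cur.reverse :: as) a
    · simp only [hs]
      exact ih (c :: cur) as a

-- leading whitespace is skipped by split₀.go with empty current word
theorem pvSGoDrop : ∀ (s : List Char) (acc : List (List Char)),
    PySem.Chars.split₀.go s [] acc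
      = PySem.Chars.split₀.go (s.dropWhile PySem.Chars.isspace) [] acc := by
  intro s
  induction s with
  | nil => intro acc; simp
  | cons c rest ih =>
    intro acc
    by_cases hs : PySem.Chars.isspace c = true
    · rw [PySem.Chars.split₀.go.eq_def]
      simp only [hs, if_true, List.isEmpty_nil, List.dropWhile_cons]
      rw [ih acc]
    · simp [hs]

-- split₀.go with empty accumulator: the first word is cur.reverse ++ the leading non-space run
theorem pvSGoTok : ∀ (s cur : List Char),
    (cur = [] → ∀ c, s.head? = some c → PySem.Chars.isspace c = false) →
    (PySem.Chars.split₀.go s cur []).head?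
      = if cur.reverse ++ s.takeWhile (fun c => !PySem.Chars.isspace c) = [] then none
        else some (cur.reverse ++ s.takeWhile (fun c => !PySem.Chars.isspace c)) := by
  intro s
  induction s with
  | nil =>
    intro cur _
    rw [PySem.Chars.split₀.go.eq_def]
    by_cases hc : cur.isEmpty = true
    · have : cur = [] := by simpa using hc
      simp [this]
    · have : cur ≠ [] := by simpa using hc
      simp [hc, this]
  | cons c rest ih =>
    intro cur hcur
    rw [PySem.Chars.split₀.go.eq_def]
    by_cases hs : PySem.Chars.isspace c = true
    · simp only [hs, if_true]
      by_cases hc : cur.isEmpty = true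
      · exfalso
        have hcn : cur = [] := by simpa using hc
        have := hcur hcn c rfl
        rw [hs] at this; cases this
      · simp only [hc, if_false, Bool.false_eq_true]
        have hcn : cur ≠ [] := by simpa using hc
        have h1 : (cur.reverse :: ([] : List (List Char))) = ([] ++ [cur.reverse]) := by simp
        rw [h1, pvSGoAcc]
        have h2 : (c :: rest).takeWhile (fun c => !PySem.Chars.isspace c) = [] := by
          simp [hs]
        rw [h2]
        simp [hcn]
    · simp only [hs, if_false, Bool.false_eq_true]
      have ih' := ih (c :: cur) (by intro h; exact absurd h (List.cons_ne_nil c cur))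
      rw [ih']
      have h2 : (c :: rest).takeWhile (fun c => !PySem.Chars.isspace c)
          = c :: rest.takeWhile (fun c => !PySem.Chars.isspace c) := by
        simp [hs]
      rw [h2]
      simp

-- the first word of split₀: strip the leading whitespace, then take the non-space run
theorem pvSplitHead (x : List Char) :
    (PySem.Chars.split₀ x).head?
      = if (x.dropWhile PySem.Chars.isspace).takeWhile (fun c => !PySem.Chars.isspace c) = [] then none
        else some ((x.dropWhile PySem.Chars.isspace).takeWhile (fun c => !PySem.Chars.isspace c)) := by
  unfold PySem.Chars.split₀
  rw [pvSGoDrop]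
  rw [pvSGoTok (x.dropWhile PySem.Chars.isspace) []
    (by
      intro _ c hc
      have := List.head?_dropWhile_not PySem.Chars.isspace x
      rw [hc] at this
      simpa using this)]
  simp

-- rstrip decomposition: y = rstrip y ++ (all-space tail)
theorem pvRstripDecomp (y : List Char) :
    ∃ t, y = PySem.Chars.rstrip y ++ t ∧ ∀ a ∈ t, PySem.Chars.isspace a = true := by
  refine ⟨(y.reverse.takeWhile PySem.Chars.isspace).reverse, ?_, ?_⟩
  · have h := List.takeWhile_append_dropWhile (p := PySem.Chars.isspace) (l := y.reverse)
    have := congrArg List.reverse h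
    simp only [List.reverse_append, List.reverse_reverse] at this
    unfold PySem.Chars.rstrip
    exact this.symm
  · intro a ha
    rw [List.mem_reverse] at ha
    exact List.mem_takeWhile_imp ha

theorem pvTakeWhileRstrip (y : List Char) :
    (PySem.Chars.rstrip y).takeWhile (fun c => !PySem.Chars.isspace c)
      = y.takeWhile (fun c => !PySem.Chars.isspace c) := by
  obtain ⟨t, hy, ht⟩ := pvRstripDecomp y
  conv_rhs => rw [hy]
  rw [List.takeWhile_append]
  split_ifs with h
  · have hself : (PySem.Chars.rstrip y).takeWhile (fun c => !PySem.Chars.isspace c) = PySem.Chars.rstrip y :=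
      (List.takeWhile_prefix _).eq_of_length h
    have htw : t.takeWhile (fun c => !PySem.Chars.isspace c) = [] := by
      cases t with
      | nil => rfl
      | cons a t' => simp [ht a (by simp)]
    rw [hself, htw, List.append_nil]
  · rfl

theorem pvRstripPrefix (y : List Char) : PySem.Chars.rstrip y <+: y := by
  obtain ⟨t, hy, _⟩ := pvRstripDecomp y
  exact ⟨t, hy.symm⟩

theorem pvRstripNeNil (c : Char) (r : List Char) (h : PySem.Chars.isspace c = false) :
    PySem.Chars.rstrip (c :: r) ≠ [] := by
  intro hnil
  obtain ⟨t, hy, ht⟩ := pvRstripDecomp (c :: r)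
  rw [hnil, List.nil_append] at hy
  have := ht c (by rw [← hy]; simp)
  rw [h] at this; cases this

theorem pvHeadGetD {α : Type} (l : List α) (a d : α) (h : l.head? = some a) : l.getD 0 d = a := by
  cases l with
  | nil => simp at h
  | cons x t => simp at h; simp [h]

-- the string-level loop body, seen on character lists
theorem pvStepBridge (st sep : String) (hsep : sep.toList ≠ []) :
    (if PySem.Str.isIn sep st then PySem.List.pyGetD ((PySem.Str.split? st sep).getD []) 0 "" else st).toList
      = if PySem.Chars.isIn sep.toList st.toList = true then pvCutAt sep.toList st.toList else st.toList := by
  rw [PySem.Str.isIn_eq]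
  cases hin : PySem.Chars.isIn sep.toList st.toList with
  | false => simp
  | true =>
    simp only [if_true]
    have hsp : PySem.Chars.split? st.toList sep.toList = some (PySem.Chars.splitOn st.toList sep.toList) := by
      rw [PySem.Chars.split?.eq_1]
      simp [hsep]
    have hmap := PySem.Str.split?_map st sep
    rw [hsp] at hmap
    obtain ⟨ps, hps, hmap'⟩ : ∃ ps, PySem.Str.split? st sep = some ps ∧
        ps.map String.toList = PySem.Chars.splitOn st.toList sep.toList := by
      cases hq : PySem.Str.split? st sep with
      | none => rw [hq] at hmap; simp at hmap
      | some ps => rw [hq] at hmap; simp at hmap; exact ⟨ps, rfl, hmap⟩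
    rw [hps]
    simp only [Option.getD_some]
    have hg := PySem.List.pyGetD_map String.toList ps 0 ""
    rw [hmap'] at hg
    have : String.toList "" = [] := rfl
    rw [this] at hg
    rw [← hg, PySem.List.pyGetD_zero]
    exact pvHeadGetD _ _ _ (pvSplitOnHead st.toList sep.toList)

-- one cut keeps the head and the first token (separators start with ' ')
theorem pvStepInv (s0 : List Char)
    (h0 : ∀ c, s0.head? = some c → PySem.Chars.isspace c = false)
    (st sep : List Char) (hsep : ∃ tl, sep = ' ' :: tl)
    (h1 : st.head? = s0.head?)
    (h2 : st.takeWhile (fun c => !PySem.Chars.isspace c) = s0.takeWhile (fun c => !PySem.Chars.isspace c)) :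
    (if PySem.Chars.isIn sep st = true then pvCutAt sep st else st).head? = s0.head?
    ∧ (if PySem.Chars.isIn sep st = true then pvCutAt sep st else st).takeWhile (fun c => !PySem.Chars.isspace c)
        = s0.takeWhile (fun c => !PySem.Chars.isspace c) := by
  obtain ⟨tl, rfl⟩ := hsep
  cases hin : PySem.Chars.isIn (' ' :: tl) st with
  | false => simp [h1, h2]
  | true =>
    simp only [if_true]
    cases st with
    | nil =>
      exfalso
      have := (PySem.Chars.isIn_iff_infix _ _).mp hin
      have hlen := this.length_le
      simp at hlen
    | cons c r =>
      have hc : PySem.Chars.isspace c = false := h0 c (by rw [← h1]; rfl)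
      constructor
      · rw [pvCutAt_head tl c r hc]
        rw [← h1]; rfl
      · rw [pvCutAt_takeWhile tl (c :: r), h2]

-- prefix of a list starting with c has head c
theorem pvPrefixHead (u v : List Char) (c : Char) (w : List Char) (hp : u <+: v) (hu : u = c :: w) :
    v.head? = some c := by
  obtain ⟨t, ht⟩ := hp
  rw [← ht, hu]; rfl

-- the stripped string has a non-space head
theorem pvStripHead (cs : List Char) :
    ∀ c, (PySem.Chars.strip cs).head? = some c → PySem.Chars.isspace c = false := by
  intro c hc
  unfold PySem.Chars.strip PySem.Chars.lstrip at hc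
  set y := cs.dropWhile PySem.Chars.isspace with hy
  cases hr : PySem.Chars.rstrip y with
  | nil => rw [hr] at hc; cases hc
  | cons a w =>
    rw [hr] at hc
    have ha : a = c := by simpa using hc
    have : y.head? = some a := pvPrefixHead _ y a w (pvRstripPrefix y) hr
    have hnp := List.head?_dropWhile_not PySem.Chars.isspace cs
    rw [← hy, this] at hnp
    simp at hnp
    rw [← ha]
    simpa using hnp

-- strip [] = []
theorem pvStripNil : PySem.Chars.strip [] = [] := rfl

-- strip cs = [] forces dropWhile to be []
theorem pvStripNilDrop (cs : List Char) (h : PySem.Chars.strip cs = []) :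
    cs.dropWhile PySem.Chars.isspace = [] := by
  unfold PySem.Chars.strip PySem.Chars.lstrip at h
  cases hy : cs.dropWhile PySem.Chars.isspace with
  | nil => rfl
  | cons a w =>
    exfalso
    have hnp := List.head?_dropWhile_not PySem.Chars.isspace cs
    rw [hy] at hnp
    simp at hnp
    rw [hy] at h
    exact pvRstripNeNil a w (by simpa using hnp) h

-- the whole cutting loop keeps the head and the first token
theorem pvFoldInv (s0 : List Char)
    (h0 : ∀ c, s0.head? = some c → PySem.Chars.isspace c = false) :
    ∀ (seps : List String) (st : String),
    (∀ sp ∈ seps, ∃ tl, sp.toList = ' ' :: tl) →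
    st.toList.head? = s0.head? →
    st.toList.takeWhile (fun c => !PySem.Chars.isspace c) = s0.takeWhile (fun c => !PySem.Chars.isspace c) →
    ((seps.foldl (fun st sep =>
        if PySem.Str.isIn sep st then PySem.List.pyGetD ((PySem.Str.split? st sep).getD []) 0 "" else st)
        st).toList.head? = s0.head?
      ∧ (seps.foldl (fun st sep =>
        if PySem.Str.isIn sep st then PySem.List.pyGetD ((PySem.Str.split? st sep).getD []) 0 "" else st)
        st).toList.takeWhile (fun c => !PySem.Chars.isspace c)
          = s0.takeWhile (fun c => !PySem.Chars.isspace c)) := by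
  intro seps
  induction seps with
  | nil => intro st _ h1 h2; exact ⟨h1, h2⟩
  | cons sp rest ih =>
    intro st hsh h1 h2
    have hsp := hsh sp (by simp)
    obtain ⟨tl, htl⟩ := hsp
    have hb := pvStepBridge st sp (by rw [htl]; simp)
    have hinv := pvStepInv s0 h0 st.toList sp.toList ⟨tl, htl⟩ h1 h2
    rw [List.foldl_cons]
    exact ih _ (fun q hq => hsh q (by simp [hq])) (by rw [hb]; exact hinv.1) (by rw [hb]; exact hinv.2)

-- head of python-split equality transfers from char lists to strings
theorem pvSplitStrEq (x y : String)
    (h : (PySem.Chars.split₀ x.toList).head? = (PySem.Chars.split₀ y.toList).head?) :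
    (PySem.Str.split₀ x).head? = (PySem.Str.split₀ y).head? := by
  have hx := PySem.Str.split₀_map_toList x
  have hy := PySem.Str.split₀_map_toList y
  have hmap : ((PySem.Str.split₀ x).head?).map String.toList
      = ((PySem.Str.split₀ y).head?).map String.toList := by
    rw [← List.head?_map, ← List.head?_map, hx, hy, h]
  have hinj : Function.Injective String.toList := by
    intro a b hab
    exact String.toList_inj.mp hab
  exact Option.map_injective hinj hmap

-- the core fact: the cutting loop and the re-strip never change the first word
theorem pvMainHead (cmd : String) :
    (PySem.Chars.split₀ (PySem.Str.strip (pvSeps.foldl (fun st sep =>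
        if PySem.Str.isIn sep st then PySem.List.pyGetD ((PySem.Str.split? st sep).getD []) 0 "" else st)
        (PySem.Str.strip cmd))).toList).head?
      = (PySem.Chars.split₀ cmd.toList).head? := by
  have h0 := pvStripHead cmd.toList
  have hshape : ∀ sp ∈ pvSeps, ∃ tl, sp.toList = ' ' :: tl := by
    intro sp hsp
    fin_cases hsp <;> exact ⟨_, rfl⟩
  have hinv := pvFoldInv (PySem.Chars.strip cmd.toList) h0 pvSeps (PySem.Str.strip cmd) hshape
    (by rw [PySem.Str.toList_strip]) (by rw [PySem.Str.toList_strip])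
  rw [PySem.Str.toList_strip]
  rw [pvSplitHead, pvSplitHead]
  set sfL := (pvSeps.foldl (fun st sep =>
      if PySem.Str.isIn sep st then PySem.List.pyGetD ((PySem.Str.split? st sep).getD []) 0 "" else st)
      (PySem.Str.strip cmd)).toList with hsfL
  cases hs0 : PySem.Chars.strip cmd.toList with
  | nil =>
    have hsf : sfL = [] := by
      have := hinv.1
      rw [hs0] at this
      simpa using this
    rw [hsf, pvStripNil]
    have hdw : cmd.toList.dropWhile PySem.Chars.isspace = [] := pvStripNilDrop cmd.toList hs0
    rw [hdw]
    simp
  | cons c s0' =>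
    have hc : PySem.Chars.isspace c = false := h0 c (by rw [hs0]; rfl)
    -- sfL = c :: r
    obtain ⟨r, hr⟩ : ∃ r, sfL = c :: r := by
      have := hinv.1
      rw [hs0] at this
      cases hl : sfL with
      | nil => rw [hl] at this; cases this
      | cons a w => rw [hl] at this; simp at this; exact ⟨w, by rw [← this]⟩
    -- strip sfL = rstrip sfL
    have hls : PySem.Chars.strip sfL = PySem.Chars.rstrip sfL := by
      unfold PySem.Chars.strip PySem.Chars.lstrip
      rw [hr, List.dropWhile_cons, hc]
      simp
    rw [hls]
    -- rstrip sfL is nonempty with head c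
    have hne : PySem.Chars.rstrip sfL ≠ [] := by rw [hr]; exact pvRstripNeNil c r hc
    have hhead : (PySem.Chars.rstrip sfL).head? = some c := by
      cases hrr : PySem.Chars.rstrip sfL with
      | nil => exact absurd hrr hne
      | cons a w =>
        have hpre := pvRstripPrefix sfL
        rw [hrr, hr] at hpre
        obtain ⟨t, ht⟩ := hpre
        have : a = c := by
          have := congrArg List.head? ht
          simpa using this
        rw [this]
        rfl
    -- dropWhile is the identity on it
    have hdw1 : (PySem.Chars.rstrip sfL).dropWhile PySem.Chars.isspace = PySem.Chars.rstrip sfL := by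
      cases hrr : PySem.Chars.rstrip sfL with
      | nil => rfl
      | cons a w =>
        rw [hrr] at hhead
        have : a = c := by simpa using hhead
        rw [List.dropWhile_cons, this, hc]
        simp
    rw [hdw1]
    -- first tokens agree
    have htok : (PySem.Chars.rstrip sfL).takeWhile (fun c => !PySem.Chars.isspace c)
        = (cmd.toList.dropWhile PySem.Chars.isspace).takeWhile (fun c => !PySem.Chars.isspace c) := by
      rw [pvTakeWhileRstrip sfL, hinv.2]
      have : PySem.Chars.strip cmd.toList
          = PySem.Chars.rstrip (cmd.toList.dropWhile PySem.Chars.isspace) := rfl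
      rw [this, pvTakeWhileRstrip]
    rw [htok]

theorem pvEquiv (command : String) : extract_command_py command = extract_command_py_alt command := by
  have hco : pvCutOnce = (fun st sep =>
      if PySem.Str.isIn sep st then PySem.List.pyGetD ((PySem.Str.split? st sep).getD []) 0 "" else st) := by
    funext st sep; rfl
  have h := pvSplitStrEq
    (PySem.Str.strip (pvSeps.foldl (fun st sep =>
      if PySem.Str.isIn sep st then PySem.List.pyGetD ((PySem.Str.split? st sep).getD []) 0 "" else st)
      (PySem.Str.strip command)))
    command (pvMainHead command)
  unfold extract_command_py extract_command_py_alt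
  rw [hco]
  dsimp only
  generalize hA : PySem.Str.split₀ (PySem.Str.strip (pvSeps.foldl (fun st sep =>
      if PySem.Str.isIn sep st then PySem.List.pyGetD ((PySem.Str.split? st sep).getD []) 0 "" else st)
      (PySem.Str.strip command))) = l1 at h ⊢
  generalize hB : PySem.Str.split₀ command = l2 at h ⊢
  cases l1 with
  | nil =>
    cases l2 with
    | nil => rfl
    | cons u us => simp at h
  | cons t ts =>
    cases l2 with
    | nil => simp at h
    | cons u us =>
      simp at h
      subst h
      rfl

-- ===== VERDICT (by name: the statement is the Claim_ definition above) =====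
theorem extract_command_py_spec : Claim_equal_extract_command_py := by
  intro command _
  unfold Spec_extract_command_py
  exact pvEquiv command
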